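-- pv_equiv track=rewrite | github.com/LukasJSvedberg/Rubix_Project_Repository | Board.py | check_position_2
-- ===== SOURCE A (Python) =====
-- import copy
--
-- def x_update(numb):
--     if numb != 0:
--         return 3 - numb
--     return 0
--
-- def z_update(numb):
--     if numb != 2:
--         return 1 - numb
--     return 2
--
-- def check_position_2(move_sequence, array_of_moves, forwards_or_back):
--     parity_numb = 0
--     array_of_moves_copy = copy.copy(array_of_moves)
--     # L - 0 1 2 3
--     # R - 8 9 10 11
--     # U - 3 6 7 11
--     # D - 0 4 5 8
--     # F - 2 5 7 10
--     # B - 1 4 6 9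
--     for element in move_sequence:
--         if element[0] == 'L':
--             if element == 'L':
--
--                 array_of_moves_copy[8][3], array_of_moves_copy[9][3], array_of_moves_copy[11][3], array_of_moves_copy[10][3] = array_of_moves_copy[10][3], array_of_moves_copy[8][3], array_of_moves_copy[9][3], array_of_moves_copy[11][3]
--                 array_of_moves_copy[3][3], array_of_moves_copy[1][3], array_of_moves_copy[0][3], array_of_moves_copy[2][3] = x_update(array_of_moves_copy[2][3]), x_update(array_of_moves_copy[3][3]), x_update(array_of_moves_copy[1][3]), x_update(array_of_moves_copy[0][3])
--
--             else:
--                 array_of_moves_copy[8][3], array_of_moves_copy[9][3], array_of_moves_copy[11][3], array_of_moves_copy[10][3] = array_of_moves_copy[9][3], array_of_moves_copy[11][3], array_of_moves_copy[10][3], array_of_moves_copy[8][3],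
--                 array_of_moves_copy[3][3], array_of_moves_copy[1][3], array_of_moves_copy[0][3], array_of_moves_copy[2][3] = x_update(array_of_moves_copy[1][3]), x_update(array_of_moves_copy[0][3]), x_update(array_of_moves_copy[2][3]), x_update(array_of_moves_copy[3][3])
--
--         elif element[0] == 'R':
--             if element == 'R':
--                 array_of_moves_copy[16][3], array_of_moves_copy[17][3], array_of_moves_copy[19][3], array_of_moves_copy[18][3] = array_of_moves_copy[17][3], array_of_moves_copy[19][3], array_of_moves_copy[18][3], array_of_moves_copy[16][3]
--                 array_of_moves_copy[7][3], array_of_moves_copy[6][3], array_of_moves_copy[4][3], array_of_moves_copy[5][3] = x_update(array_of_moves_copy[5][3]), x_update(array_of_moves_copy[7][3]), x_update(array_of_moves_copy[6][3]), x_update(array_of_moves_copy[4][3])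
--
--             else:
--                 array_of_moves_copy[16][3], array_of_moves_copy[17][3], array_of_moves_copy[19][3], array_of_moves_copy[18][3] = array_of_moves_copy[18][3], array_of_moves_copy[16][3], array_of_moves_copy[17][3], array_of_moves_copy[19][3]
--                 array_of_moves_copy[7][3], array_of_moves_copy[6][3], array_of_moves_copy[4][3], array_of_moves_copy[5][3] = x_update(array_of_moves_copy[6][3]), x_update(array_of_moves_copy[4][3]), x_update(array_of_moves_copy[5][3]), x_update(array_of_moves_copy[7][3])
--
--         elif element == 'U2':
--             array_of_moves_copy[11][3], array_of_moves_copy[14][3], array_of_moves_copy[19][3], array_of_moves_copy[15][3] = array_of_moves_copy[19][3], array_of_moves_copy[15][3], array_of_moves_copy[11][3], array_of_moves_copy[14][3]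
--             array_of_moves_copy[7][3], array_of_moves_copy[6][3], array_of_moves_copy[2][3], array_of_moves_copy[3][3] = array_of_moves_copy[2][3], array_of_moves_copy[3][3], array_of_moves_copy[7][3], array_of_moves_copy[6][3]
--
--         elif element == 'D2':
--             array_of_moves_copy[8][3], array_of_moves_copy[12][3], array_of_moves_copy[16][3], array_of_moves_copy[13][3] = array_of_moves_copy[16][3], array_of_moves_copy[13][3], array_of_moves_copy[8][3], array_of_moves_copy[12][3]
--             array_of_moves_copy[5][3], array_of_moves_copy[4][3], array_of_moves_copy[0][3], array_of_moves_copy[1][3] = array_of_moves_copy[0][3], array_of_moves_copy[1][3], array_of_moves_copy[5][3], array_of_moves_copy[4][3]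
--
--         elif element[0] == 'F':
--             if element == 'F':
--                 array_of_moves_copy[10][3], array_of_moves_copy[13][3], array_of_moves_copy[18][3], array_of_moves_copy[15][3] = array_of_moves_copy[13][3], array_of_moves_copy[18][3], array_of_moves_copy[15][3], array_of_moves_copy[10][3]
--                 array_of_moves_copy[1][3], array_of_moves_copy[3][3], array_of_moves_copy[7][3], array_of_moves_copy[5][3] = z_update(array_of_moves_copy[5][3]), z_update(array_of_moves_copy[1][3]), z_update(array_of_moves_copy[3][3]), z_update(array_of_moves_copy[7][3])
--
--             else:
--                 array_of_moves_copy[10][3], array_of_moves_copy[13][3], array_of_moves_copy[18][3], array_of_moves_copy[15][3] = array_of_moves_copy[15][3], array_of_moves_copy[10][3], array_of_moves_copy[13][3], array_of_moves_copy[18][3]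
--                 array_of_moves_copy[1][3], array_of_moves_copy[3][3], array_of_moves_copy[7][3], array_of_moves_copy[5][3] = z_update(array_of_moves_copy[3][3]), z_update(array_of_moves_copy[7][3]), z_update(array_of_moves_copy[5][3]), z_update(array_of_moves_copy[1][3])
--
--
--         elif element[0] == 'B':
--             if element == 'B':
--                 array_of_moves_copy[9][3], array_of_moves_copy[12][3], array_of_moves_copy[17][3], array_of_moves_copy[14][3], = array_of_moves_copy[14][3], array_of_moves_copy[9][3], array_of_moves_copy[12][3], array_of_moves_copy[17][3]
--                 array_of_moves_copy[0][3], array_of_moves_copy[2][3], array_of_moves_copy[6][3], array_of_moves_copy[4][3] = z_update(array_of_moves_copy[2][3]), z_update(array_of_moves_copy[6][3]), z_update(array_of_moves_copy[4][3]), z_update(array_of_moves_copy[0][3])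
--             else:
--                 array_of_moves_copy[0][3], array_of_moves_copy[2][3], array_of_moves_copy[6][3], array_of_moves_copy[4][3] = z_update(array_of_moves_copy[4][3]), z_update(array_of_moves_copy[0][3]), z_update(array_of_moves_copy[2][3]), z_update(array_of_moves_copy[6][3])
--                 array_of_moves_copy[9][3], array_of_moves_copy[12][3], array_of_moves_copy[17][3], array_of_moves_copy[14][3] = array_of_moves_copy[12][3], array_of_moves_copy[17][3], array_of_moves_copy[14][3], array_of_moves_copy[9][3]
--
--     for x, element in enumerate(array_of_moves_copy):
--         if x < 8:
--             parity_numb += element[3] * (4 ** (7 - x))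
--         else:
--             parity_numb += element[3] * (2 ** (19 - x)) * 65536
--     return move_sequence, parity_numb
-- ===== SOURCE B (Python) =====
-- # B: table-driven re-implementation. Each move is data: a list of 4-cycles
-- # (slot indices, rotation offset d, per-slot transform), interpreted by one
-- # generic applier. Like A, mutates the rows of array_of_moves in place
-- # (shallow copy of the outer list only); return value equivalence is what is
-- # claimed.
-- import copy
--
-- def x_update(numb):
--     return 3 - numb if numb != 0 else 0
--
-- def z_update(numb):
--     return 1 - numb if numb != 2 else 2
--
-- def _ident(numb):
--     return numb
--
-- # each entry: (cycle indices, d, fn) meaning new[c[k]] = fn(old[c[(k+d) % 4]])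
-- _L  = [([8, 9, 11, 10], 3, _ident), ([3, 1, 0, 2], 3, x_update)]
-- _LP = [([8, 9, 11, 10], 1, _ident), ([3, 1, 0, 2], 1, x_update)]
-- _R  = [([16, 17, 19, 18], 1, _ident), ([7, 6, 4, 5], 3, x_update)]
-- _RP = [([16, 17, 19, 18], 3, _ident), ([7, 6, 4, 5], 1, x_update)]
-- _U2 = [([11, 14, 19, 15], 2, _ident), ([7, 6, 2, 3], 2, _ident)]
-- _D2 = [([8, 12, 16, 13], 2, _ident), ([5, 4, 0, 1], 2, _ident)]
-- _F  = [([10, 13, 18, 15], 1, _ident), ([1, 3, 7, 5], 3, z_update)]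
-- _FP = [([10, 13, 18, 15], 3, _ident), ([1, 3, 7, 5], 1, z_update)]
-- _B  = [([9, 12, 17, 14], 3, _ident), ([0, 2, 6, 4], 1, z_update)]
-- _BP = [([0, 2, 6, 4], 3, z_update), ([9, 12, 17, 14], 1, _ident)]
--
-- def _cycles(element):
--     if element == 'U2':
--         return _U2
--     if element == 'D2':
--         return _D2
--     c = element[:1]
--     if c == 'L':
--         return _L if element == 'L' else _LP
--     if c == 'R':
--         return _R if element == 'R' else _RP
--     if c == 'F':
--         return _F if element == 'F' else _FP
--     if c == 'B':
--         return _B if element == 'B' else _BP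
--     return []
--
-- def check_position_2(move_sequence, array_of_moves, forwards_or_back):
--     board = copy.copy(array_of_moves)
--     for element in move_sequence:
--         for cyc, d, fn in _cycles(element):
--             old = [board[i][3] for i in cyc]
--             for k, i in enumerate(cyc):
--                 board[i][3] = fn(old[(k + d) % 4])
--     parity_numb = sum(row[3] * (4 ** (7 - x) if x < 8 else 2 ** (19 - x) * 65536)
--                       for x, row in enumerate(board))
--     return move_sequence, parity_numb
-- ===== Notes on version B (the rewrite author's own statement) =====
-- stated objective: simpler
-- what changed: Replaced A's ten hand-unrolled simultaneous tuple-assignment branches by a data table mapping each move to its 4-cycles (slot indices, rotation offset, per-slot transform) interpreted by one generic snapshot-then-write applier, and the final two-branch accumulation loop by a single sum().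
import Mathlib
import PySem

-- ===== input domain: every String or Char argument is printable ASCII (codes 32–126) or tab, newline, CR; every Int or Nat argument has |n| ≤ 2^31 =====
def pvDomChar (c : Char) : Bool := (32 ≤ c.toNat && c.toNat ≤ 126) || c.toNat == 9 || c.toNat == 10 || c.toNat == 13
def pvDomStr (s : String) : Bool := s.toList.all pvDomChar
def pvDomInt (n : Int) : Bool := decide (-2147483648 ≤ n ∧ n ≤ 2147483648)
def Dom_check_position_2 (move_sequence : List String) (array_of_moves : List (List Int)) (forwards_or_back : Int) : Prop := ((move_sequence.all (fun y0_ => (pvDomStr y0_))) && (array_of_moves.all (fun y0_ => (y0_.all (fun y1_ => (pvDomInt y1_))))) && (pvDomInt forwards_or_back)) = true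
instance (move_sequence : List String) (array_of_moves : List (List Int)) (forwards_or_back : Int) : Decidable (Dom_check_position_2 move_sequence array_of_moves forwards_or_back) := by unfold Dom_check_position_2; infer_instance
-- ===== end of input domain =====

-- B replaces A's ten hand-unrolled simultaneous tuple assignments by a data table of 4-cycles
-- interpreted by one generic applier (objective: simpler). Both Pythons mutate the rows of
-- array_of_moves in place (the outer list is shallow-copied); the theorems are about the return value.

-- shared helpers (module context of both Pythons)
def xu (numb : Int) : Int := if numb ≠ 0 then 3 - numb else 0   -- x_update
def zu (numb : Int) : Int := if numb ≠ 2 then 1 - numb else 2   -- z_update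
-- read board[i][3]; total with default 0 — exact under Pre_ (index in range, rows of length ≥ 4)
def g (b : List (List Int)) (i : Nat) : Int := PySem.List.pyGetD (b.getD i []) 3 0
-- board[i][3] = v; no-op out of range — exact under Pre_
def set3 (b : List (List Int)) (i : Nat) (v : Int) : List (List Int) := b.modify i (fun r => r.set 3 v)

-- ===== PORT A =====
-- one simultaneous tuple assignment = read all RHS from the current board, then write left-to-right
def applyA (b : List (List Int)) (cs : List Char) : List (List Int) :=
  match cs with
  | [] => b   -- Python raises IndexError on element[0]; excluded by Pre_
  | c :: t =>
    if c = 'L' then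
      if c :: t = ['L'] then
        let b1 := (set3 (set3 (set3 (set3 b 8 (g b 10)) 9 (g b 8)) 11 (g b 9)) 10 (g b 11))
        (set3 (set3 (set3 (set3 b1 3 (xu (g b1 2))) 1 (xu (g b1 3))) 0 (xu (g b1 1))) 2 (xu (g b1 0)))
      else
        let b1 := (set3 (set3 (set3 (set3 b 8 (g b 9)) 9 (g b 11)) 11 (g b 10)) 10 (g b 8))
        (set3 (set3 (set3 (set3 b1 3 (xu (g b1 1))) 1 (xu (g b1 0))) 0 (xu (g b1 2))) 2 (xu (g b1 3)))
    else if c = 'R' then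
      if c :: t = ['R'] then
        let b1 := (set3 (set3 (set3 (set3 b 16 (g b 17)) 17 (g b 19)) 19 (g b 18)) 18 (g b 16))
        (set3 (set3 (set3 (set3 b1 7 (xu (g b1 5))) 6 (xu (g b1 7))) 4 (xu (g b1 6))) 5 (xu (g b1 4)))
      else
        let b1 := (set3 (set3 (set3 (set3 b 16 (g b 18)) 17 (g b 16)) 19 (g b 17)) 18 (g b 19))
        (set3 (set3 (set3 (set3 b1 7 (xu (g b1 6))) 6 (xu (g b1 4))) 4 (xu (g b1 5))) 5 (xu (g b1 7)))
    else if c :: t = ['U', '2'] then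
      let b1 := (set3 (set3 (set3 (set3 b 11 (g b 19)) 14 (g b 15)) 19 (g b 11)) 15 (g b 14))
      (set3 (set3 (set3 (set3 b1 7 (g b1 2)) 6 (g b1 3)) 2 (g b1 7)) 3 (g b1 6))
    else if c :: t = ['D', '2'] then
      let b1 := (set3 (set3 (set3 (set3 b 8 (g b 16)) 12 (g b 13)) 16 (g b 8)) 13 (g b 12))
      (set3 (set3 (set3 (set3 b1 5 (g b1 0)) 4 (g b1 1)) 0 (g b1 5)) 1 (g b1 4))
    else if c = 'F' then
      if c :: t = ['F'] then
        let b1 := (set3 (set3 (set3 (set3 b 10 (g b 13)) 13 (g b 18)) 18 (g b 15)) 15 (g b 10))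
        (set3 (set3 (set3 (set3 b1 1 (zu (g b1 5))) 3 (zu (g b1 1))) 7 (zu (g b1 3))) 5 (zu (g b1 7)))
      else
        let b1 := (set3 (set3 (set3 (set3 b 10 (g b 15)) 13 (g b 10)) 18 (g b 13)) 15 (g b 18))
        (set3 (set3 (set3 (set3 b1 1 (zu (g b1 3))) 3 (zu (g b1 7))) 7 (zu (g b1 5))) 5 (zu (g b1 1)))
    else if c = 'B' then
      if c :: t = ['B'] then
        let b1 := (set3 (set3 (set3 (set3 b 9 (g b 14)) 12 (g b 9)) 17 (g b 12)) 14 (g b 17))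
        (set3 (set3 (set3 (set3 b1 0 (zu (g b1 2))) 2 (zu (g b1 6))) 6 (zu (g b1 4))) 4 (zu (g b1 0)))
      else
        let b1 := (set3 (set3 (set3 (set3 b 0 (zu (g b 4))) 2 (zu (g b 0))) 6 (zu (g b 2))) 4 (zu (g b 6)))
        (set3 (set3 (set3 (set3 b1 9 (g b1 12)) 12 (g b1 17)) 17 (g b1 14)) 14 (g b1 9))
    else b

-- the final parity loop of A ('.toNat' on the exponents is exact: the guard x < 8 resp. Pre_'s
-- length bound ≤ 20 keeps them nonnegative wherever Python computes an int)
def parityA (b : List (List Int)) : Int :=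
  (PySem.List.enumerate b).foldl (fun acc p =>
    if p.1 < 8 then acc + (PySem.List.pyGetD p.2 3 0) * 4 ^ (7 - p.1).toNat
    else acc + (PySem.List.pyGetD p.2 3 0) * 2 ^ (19 - p.1).toNat * 65536) 0

def check_position_2 (move_sequence : List String) (array_of_moves : List (List Int)) (forwards_or_back : Int) : List String × Int :=
  let final := move_sequence.foldl (fun b e => applyA b e.toList) array_of_moves
  (move_sequence, parityA final)

-- ===== PORT B =====
-- each entry: (cycle indices, d, fn) meaning new[c[k]] = fn(old[c[(k+d) % 4]])
def tblL : List (List Nat × Nat × (Int → Int)) := [([8, 9, 11, 10], 3, fun v => v), ([3, 1, 0, 2], 3, xu)]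
def tblLP : List (List Nat × Nat × (Int → Int)) := [([8, 9, 11, 10], 1, fun v => v), ([3, 1, 0, 2], 1, xu)]
def tblR : List (List Nat × Nat × (Int → Int)) := [([16, 17, 19, 18], 1, fun v => v), ([7, 6, 4, 5], 3, xu)]
def tblRP : List (List Nat × Nat × (Int → Int)) := [([16, 17, 19, 18], 3, fun v => v), ([7, 6, 4, 5], 1, xu)]
def tblU2 : List (List Nat × Nat × (Int → Int)) := [([11, 14, 19, 15], 2, fun v => v), ([7, 6, 2, 3], 2, fun v => v)]
def tblD2 : List (List Nat × Nat × (Int → Int)) := [([8, 12, 16, 13], 2, fun v => v), ([5, 4, 0, 1], 2, fun v => v)]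
def tblF : List (List Nat × Nat × (Int → Int)) := [([10, 13, 18, 15], 1, fun v => v), ([1, 3, 7, 5], 3, zu)]
def tblFP : List (List Nat × Nat × (Int → Int)) := [([10, 13, 18, 15], 3, fun v => v), ([1, 3, 7, 5], 1, zu)]
def tblB : List (List Nat × Nat × (Int → Int)) := [([9, 12, 17, 14], 3, fun v => v), ([0, 2, 6, 4], 1, zu)]
def tblBP : List (List Nat × Nat × (Int → Int)) := [([0, 2, 6, 4], 3, zu), ([9, 12, 17, 14], 1, fun v => v)]

def cyclesFor (cs : List Char) : List (List Nat × Nat × (Int → Int)) :=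
  if cs = ['U', '2'] then tblU2
  else if cs = ['D', '2'] then tblD2
  else
    let c := cs.take 1    -- element[:1]
    if c = ['L'] then (if cs = ['L'] then tblL else tblLP)
    else if c = ['R'] then (if cs = ['R'] then tblR else tblRP)
    else if c = ['F'] then (if cs = ['F'] then tblF else tblFP)
    else if c = ['B'] then (if cs = ['B'] then tblB else tblBP)
    else []

-- snapshot the cycle's slots, then write the rotated/transformed values back
def applyCyc (b : List (List Int)) (t : List Nat × Nat × (Int → Int)) : List (List Int) :=
  let old := t.1.map (fun i => g b i)
  (PySem.List.enumerate t.1).foldl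
    (fun acc p => set3 acc p.2 (t.2.2 (PySem.List.pyGetD old ((p.1 + (t.2.1 : Int)) % 4) 0))) b

def applyB (b : List (List Int)) (cs : List Char) : List (List Int) :=
  (cyclesFor cs).foldl applyCyc b

def parityB (b : List (List Int)) : Int :=
  ((PySem.List.enumerate b).map (fun p =>
    (PySem.List.pyGetD p.2 3 0) * (if p.1 < 8 then 4 ^ (7 - p.1).toNat else 2 ^ (19 - p.1).toNat * 65536))).sum

def check_position_2_alt (move_sequence : List String) (array_of_moves : List (List Int)) (forwards_or_back : Int) : List String × Int :=
  let final := move_sequence.foldl (fun b e => applyB b e.toList) array_of_moves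
  (move_sequence, parityB final)

-- ===== PRECONDITION & SPEC =====
-- smallest board length each move string needs (the largest [i] index A touches for it, plus one)
def reqLen (cs : List Char) : Nat :=
  match cs with
  | [] => 0
  | c :: _ =>
    if c = 'L' then 12 else if c = 'R' then 20
    else if cs = ['U', '2'] then 20 else if cs = ['D', '2'] then 17
    else if c = 'F' then 19 else if c = 'B' then 18 else 0

-- Exactly the inputs on which Python A returns an int: a board of at most 20 rows (beyond 20 the
-- parity line computes a float 2**(negative)), every row of length ≥ 4 (else row[3] raises), no
-- empty move string (element[0] raises) and every move's slot indices inside the board.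
def Pre_check_position_2 (move_sequence : List String) (array_of_moves : List (List Int)) (forwards_or_back : Int) : Prop :=
  array_of_moves.length ≤ 20 ∧ (∀ r ∈ array_of_moves, 4 ≤ r.length) ∧
  (∀ m ∈ move_sequence, m.toList ≠ [] ∧ reqLen m.toList ≤ array_of_moves.length)
instance (move_sequence : List String) (array_of_moves : List (List Int)) (forwards_or_back : Int) : Decidable (Pre_check_position_2 move_sequence array_of_moves forwards_or_back) := by unfold Pre_check_position_2; infer_instance

def pvWitness_check_position_2 : List String × List (List Int) × Int :=
  (["L", "U2"], [[0,0,0,0],[0,0,0,1],[0,0,0,2],[0,0,0,3],[0,0,0,0],[0,0,0,1],[0,0,0,2],[0,0,0,3],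
                 [0,0,0,0],[0,0,0,1],[0,0,0,0],[0,0,0,1],[0,0,0,0],[0,0,0,1],[0,0,0,0],[0,0,0,1],
                 [0,0,0,0],[0,0,0,1],[0,0,0,0],[0,0,0,1]], 0)

def Spec_check_position_2 (move_sequence : List String) (array_of_moves : List (List Int)) (forwards_or_back : Int) (out : List String × Int) : Prop := out = check_position_2_alt move_sequence array_of_moves forwards_or_back
instance (move_sequence : List String) (array_of_moves : List (List Int)) (forwards_or_back : Int) (out : List String × Int) : Decidable (Spec_check_position_2 move_sequence array_of_moves forwards_or_back out) := by unfold Spec_check_position_2; infer_instance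

-- ===== CLAIM (what is proved, stated in full; the proofs are below) =====
def Claim_equal_check_position_2 : Prop := ∀ (move_sequence : List String) (array_of_moves : List (List Int)) (forwards_or_back : Int), Dom_check_position_2 move_sequence array_of_moves forwards_or_back → Pre_check_position_2 move_sequence array_of_moves forwards_or_back → Spec_check_position_2 move_sequence array_of_moves forwards_or_back (check_position_2 move_sequence array_of_moves forwards_or_back)
-- ===== LEMMAS AND PROOFS =====
lemma moveEq (b : List (List Int)) (cs : List Char) : applyA b cs = applyB b cs := by
  cases cs with
  | nil => rfl
  | cons c t =>
    by_cases hU : c :: t = ['U', '2']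
    · rw [hU]; rfl
    by_cases hD : c :: t = ['D', '2']
    · rw [hD]; rfl
    by_cases hL : c = 'L'
    · subst hL
      by_cases h1 : 'L' :: t = ['L']
      · rw [h1]; rfl
      · simp [applyA, applyB, cyclesFor, hU, hD, h1]; rfl
    by_cases hR : c = 'R'
    · subst hR
      by_cases h1 : 'R' :: t = ['R']
      · rw [h1]; rfl
      · simp [applyA, applyB, cyclesFor, hU, hD, h1]; rfl
    by_cases hF : c = 'F'
    · subst hF
      by_cases h1 : 'F' :: t = ['F']
      · rw [h1]; rfl
      · simp [applyA, applyB, cyclesFor, hU, hD, h1]; rfl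
    by_cases hB : c = 'B'
    · subst hB
      by_cases h1 : 'B' :: t = ['B']
      · rw [h1]; rfl
      · simp [applyA, applyB, cyclesFor, hU, hD, h1]; rfl
    · simp [applyA, applyB, cyclesFor, hU, hD, hL, hR, hF, hB]

lemma parity_eq (b : List (List Int)) : parityA b = parityB b := by
  unfold parityA parityB
  generalize (PySem.List.enumerate b) = l
  suffices h : ∀ (l : List (Int × List Int)) (a : Int),
      l.foldl (fun acc p =>
        if p.1 < 8 then acc + (PySem.List.pyGetD p.2 3 0) * 4 ^ (7 - p.1).toNat
        else acc + (PySem.List.pyGetD p.2 3 0) * 2 ^ (19 - p.1).toNat * 65536) a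
      = a + (l.map (fun p =>
        (PySem.List.pyGetD p.2 3 0) * (if p.1 < 8 then 4 ^ (7 - p.1).toNat else 2 ^ (19 - p.1).toNat * 65536))).sum by
    simpa using h l 0
  intro l
  induction l with
  | nil => simp
  | cons p l ih =>
    intro a
    simp only [List.foldl_cons, List.map_cons, List.sum_cons, ih]
    split_ifs <;> ring

theorem check_position_2_spec : Claim_equal_check_position_2 := by
  intro ms arr fb _ _
  unfold Spec_check_position_2 check_position_2 check_position_2_alt
  have h : ∀ (b : List (List Int)), ms.foldl (fun b e => applyA b e.toList) b = ms.foldl (fun b e => applyB b e.toList) b := by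
    intro b
    have : (fun (b : List (List Int)) (e : String) => applyA b e.toList) = (fun b e => applyB b e.toList) := by
      funext b e; exact moveEq b e.toList
    rw [this]
  simp only [h, parity_eq]
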